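-- pv_equiv track=rewrite | github.com/calvinchankf/GoogleKickStart | 2020/H/b.py | f
-- ===== SOURCE A (Python) =====
-- def f(L, R):
--     res = 0
--     cur = L
--     while cur <= R:
--         if isBoring(cur):
--             res += 1
--         cur += 1
--     return res
--
-- def isBoring(n):
--     s = str(n)
--     for i in range(len(s)):
--         if i % 2 == 0:
--             if s[i] in '02468':
--                 return False
--         else:
--             if s[i] in '13579':
--                 return False
--     return True
-- ===== SOURCE B (Python) =====
-- def g(N):
--     # Count the boring numbers in [1..N]: decimal digits alternate
--     # odd, even, odd, ... starting from the most significant digit.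
--     if N <= 0:
--         return 0
--     digits = []
--     while N > 0:
--         digits.append(N % 10)
--         N //= 10
--     digits.reverse()
--     k = len(digits)
--     # boring numbers with fewer digits: 5 parity-respecting choices per position
--     total = 0
--     for j in range(1, k):
--         total += 5 ** j
--     # boring numbers with exactly k digits that are <= N
--     want_odd = True
--     for i in range(k):
--         d = digits[i]
--         lower = d // 2 if want_odd else (d + 1) // 2
--         total += lower * 5 ** (k - 1 - i)
--         if d % 2 != (1 if want_odd else 0):
--             break
--         want_odd = not want_odd
--     else:
--         total += 1
--     return total
--
--
-- def f(L, R):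
--     if L > R:
--         return 0
--     return g(R) - g(L - 1)
-- ===== Notes on version B (the rewrite author's own statement) =====
-- stated objective: faster
-- what changed: Replaced the per-number scan of [L,R] (string-testing every integer) by a combinatorial digit count g(N) of boring numbers in [1..N] computed in one walk over N's digits, so f = g(R) - g(L-1); Pre_ restricts to the problem's natural domain L >= 0, because for negative n A's digit test scans str(n) with the '-' sign occupying position 0, which shifts the parity pattern.
-- outside the precondition, e.g. on f(-2, -2): A returns 1, B returns 0
import Mathlib
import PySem

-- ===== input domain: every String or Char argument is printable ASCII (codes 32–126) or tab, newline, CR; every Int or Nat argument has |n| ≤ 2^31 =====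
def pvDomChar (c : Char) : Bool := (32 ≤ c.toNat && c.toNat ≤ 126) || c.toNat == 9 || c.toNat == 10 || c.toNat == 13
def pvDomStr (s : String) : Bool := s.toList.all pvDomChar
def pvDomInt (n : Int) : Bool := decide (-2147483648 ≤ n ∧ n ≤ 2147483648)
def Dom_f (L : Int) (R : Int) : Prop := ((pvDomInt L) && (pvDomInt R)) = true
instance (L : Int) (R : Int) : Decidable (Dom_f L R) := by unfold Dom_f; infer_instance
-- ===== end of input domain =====

-- B replaces A's per-number scan of [L,R] by a combinatorial digit count
-- (prefix counter g over [1..N], f = g(R) - g(L-1)); objective: faster.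

-- ===== PORT A =====
-- `s[i] in '02468'` is ported as membership of the character in the char list of that string (exact).
def isBoringLoop : List Char → Nat → Bool
  | [], _ => true
  | c :: cs, i =>
    if i % 2 = 0 then
      (if c ∈ ['0','2','4','6','8'] then false else isBoringLoop cs (i + 1))
    else
      (if c ∈ ['1','3','5','7','9'] then false else isBoringLoop cs (i + 1))

def isBoring (n : Int) : Bool := isBoringLoop (PySem.Int.toChars n) 0

def fAux (R : Int) (res : Int) (cur : Int) : Int :=
  if cur ≤ R then fAux R (res + if isBoring cur then 1 else 0) (cur + 1) else res
termination_by (R + 1 - cur).toNat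
decreasing_by omega

def f (L : Int) (R : Int) : Int := fAux R 0 L

-- ===== PORT B =====
-- digit extraction: while N > 0: digits.append(N % 10); N //= 10  (lsd first)
def digsLSD (N : Nat) : List Nat :=
  if h : N = 0 then [] else N % 10 :: digsLSD (N / 10)
termination_by N
decreasing_by exact Nat.div_lt_self (Nat.pos_of_ne_zero h) (by omega)

-- the for/else walk over the digit list (msd first); p = want_odd
def walkB : List Nat → Bool → Int
  | [], _ => 1
  | d :: ds, p =>
    (if p then ((d / 2 : Nat) : Int) else (((d + 1) / 2 : Nat) : Int)) * 5 ^ ds.length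
      + (if d % 2 == (if p then 1 else 0) then walkB ds (!p) else 0)

def g (N : Int) : Int :=
  if N ≤ 0 then 0
  else
    let ds := (digsLSD N.toNat).reverse
    let k := ds.length
    let total := (List.range' 1 (k - 1)).foldl (fun t j => t + (5 : Int) ^ j) 0
    total + walkB ds true

def f_alt (L : Int) (R : Int) : Int := if L > R then 0 else g R - g (L - 1)

-- ===== PRECONDITION & SPEC =====
-- Pre_ restricts to the problem's natural domain L ≥ 0 (boring numbers are about
-- decimal digits of non-negative integers): for negative n, A's test scans str(n)
-- with the '-' sign occupying position 0, shifting the digit-parity pattern, and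
-- B does not reproduce that.
def Pre_f (L : Int) (R : Int) : Prop := 0 ≤ L
instance (L : Int) (R : Int) : Decidable (Pre_f L R) := by unfold Pre_f; infer_instance
def pvWitness_f : Int × Int := (0, 25)

def Spec_f (L : Int) (R : Int) (out : Int) : Prop := out = f_alt L R
instance (L : Int) (R : Int) (out : Int) : Decidable (Spec_f L R out) := by unfold Spec_f; infer_instance

-- ===== CLAIM (what is proved, stated in full; the proofs are below) =====
def Claim_equal_f : Prop := ∀ (L : Int) (R : Int), Dom_f L R → Pre_f L R → Spec_f L R (f L R)

-- ===== LEMMAS AND PROOFS =====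

-- proof-side vocabulary -------------------------------------------------------
def pbit (p : Bool) : Nat := if p then 1 else 0

-- parity pattern on the k-padded decimal expansion of v (msd first)
def patPad : Bool → Nat → Nat → Bool
  | _, 0, _ => true
  | p, k + 1, v => (v / 10 ^ k % 2 == pbit p) && patPad (!p) k (v % 10 ^ k)

-- parity pattern on an explicit digit list (msd first)
def listPat : Bool → List Nat → Bool
  | _, [] => true
  | p, d :: ds => (d % 2 == pbit p) && listPat (!p) ds

def C (p : Bool) (k M : Nat) : Nat := (List.range M).countP (patPad p k)

def boringN (n : Nat) : Bool := decide (n ≠ 0) && listPat true ((Nat.digits 10 n).reverse)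

def GGn (M : Nat) : Nat := (List.range M).countP boringN

def cntPar (p : Bool) (x : Nat) : Nat := if p then x / 2 else (x + 1) / 2

def SSum : Nat → Nat
  | 0 => 0
  | k + 1 => SSum k + 5 * 5 ^ k

-- basic lemmas ---------------------------------------------------------------
theorem digsLSD_eq (N : Nat) : digsLSD N = Nat.digits 10 N := by
  induction N using Nat.strong_induction_on with
  | _ N ih =>
    unfold digsLSD
    by_cases h : N = 0
    · simp [h]
    · rw [dif_neg h, Nat.digits_def' (by omega) (Nat.pos_of_ne_zero h),
        ih (N / 10) (Nat.div_lt_self (Nat.pos_of_ne_zero h) (by omega))]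

theorem patPad_succ (p : Bool) (k v : Nat) :
    patPad p (k + 1) v = ((v / 10 ^ k % 2 == pbit p) && patPad (!p) k (v % 10 ^ k)) := rfl

theorem C_block (k : Nat) (hful : ∀ p, C p k (10 ^ k) = 5 ^ k) (p : Bool) (x : Nat) :
    C p (k + 1) (x * 10 ^ k) = cntPar p x * 5 ^ k := by
  induction x with
  | zero => cases p <;> simp [C, cntPar]
  | succ x ih =>
    have hx1 : (x + 1) * 10 ^ k = x * 10 ^ k + 10 ^ k := by ring
    rw [hx1, C, List.range_add, List.countP_append, List.countP_map]
    have hcong : (List.range (10 ^ k)).countP (patPad p (k + 1) ∘ (fun y => x * 10 ^ k + y))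
        = (List.range (10 ^ k)).countP (fun w => (x % 2 == pbit p) && patPad (!p) k w) := by
      apply List.countP_congr
      intro w hw
      simp only [List.mem_range] at hw
      have h1 : (x * 10 ^ k + w) / 10 ^ k = x := by
        rw [Nat.mul_comm x (10 ^ k), Nat.mul_add_div (Nat.pow_pos (by omega)),
          Nat.div_eq_of_lt hw, Nat.add_zero]
      have h2 : (x * 10 ^ k + w) % 10 ^ k = w := by
        rw [Nat.add_comm, Nat.add_mul_mod_self_right, Nat.mod_eq_of_lt hw]
      simp only [Function.comp, patPad_succ, h1, h2]
    rw [hcong]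
    cases hx : (x % 2 == pbit p) with
    | false =>
      simp only [Bool.false_and, List.countP_false]
      have hpar : cntPar p (x + 1) = cntPar p x := by
        cases p <;> simp_all [cntPar, pbit] <;> omega
      rw [← C, ih, hpar]
      simp [Function.const]
    | true =>
      simp only [Bool.true_and]
      have hpar : cntPar p (x + 1) = cntPar p x + 1 := by
        cases p <;> simp_all [cntPar, pbit] <;> omega
      rw [show (List.range (10 ^ k)).countP (fun w => patPad (!p) k w) = C (!p) k (10 ^ k) from rfl,
        hful, ← C, ih, hpar]
      ring

theorem C_full : ∀ (k : Nat) (p : Bool), C p k (10 ^ k) = 5 ^ k := by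
  intro k
  induction k with
  | zero => intro p; simp [C, patPad]
  | succ k ih =>
    intro p
    rw [pow_succ, Nat.mul_comm, C_block k ih p 10]
    cases p <;> simp [cntPar, pow_succ] <;> ring

theorem C_true_low (k : Nat) : C true (k + 1) (10 ^ k) = 0 := by
  rw [C, List.countP_eq_zero]
  intro v hv
  simp only [List.mem_range] at hv
  have h1 : v / 10 ^ k = 0 := Nat.div_eq_of_lt hv
  simp [patPad_succ, h1, pbit]

theorem listPat_patPad (ds : List Nat) (p : Bool) (h : ∀ d ∈ ds, d < 10) :
    listPat p ds = patPad p ds.length (Nat.ofDigits 10 ds.reverse) := by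
  induction ds generalizing p with
  | nil => simp [listPat, patPad]
  | cons d ds ih =>
    have hd : d < 10 := h d (List.mem_cons_self ..)
    have hds : ∀ x ∈ ds, x < 10 := fun x hx => h x (List.mem_cons_of_mem _ hx)
    have hm : Nat.ofDigits 10 ds.reverse < 10 ^ ds.length := by
      have := Nat.ofDigits_lt_base_pow_length (b := 10) (l := ds.reverse) (by omega)
        (fun x hx => hds x (List.mem_reverse.mp hx))
      simpa using this
    have hv : (Nat.ofDigits 10 (d :: ds).reverse : Nat)
        = Nat.ofDigits 10 ds.reverse + 10 ^ ds.length * d := by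
      rw [List.reverse_cons, Nat.ofDigits_append]
      simp [Nat.ofDigits_singleton]
    rw [hv]
    have h1 : (Nat.ofDigits 10 ds.reverse + 10 ^ ds.length * d) / 10 ^ ds.length = d := by
      rw [Nat.add_mul_div_left _ _ (Nat.pow_pos (by omega)), Nat.div_eq_of_lt hm, Nat.zero_add]
    have h2 : (Nat.ofDigits 10 ds.reverse + 10 ^ ds.length * d) % 10 ^ ds.length
        = Nat.ofDigits 10 ds.reverse := by
      rw [Nat.add_mul_mod_self_left, Nat.mod_eq_of_lt hm]
    show listPat p (d :: ds) = patPad p (ds.length + 1) _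
    rw [patPad_succ, h1, h2, ← ih (!p) hds]
    rfl

theorem walkB_eq (ds : List Nat) (p : Bool) (h : ∀ d ∈ ds, d < 10) :
    walkB ds p = (C p ds.length (Nat.ofDigits 10 ds.reverse + 1) : Int) := by
  induction ds generalizing p with
  | nil => simp [walkB, C, patPad]
  | cons d ds ih =>
    have hd : d < 10 := h d (List.mem_cons_self ..)
    have hds : ∀ x ∈ ds, x < 10 := fun x hx => h x (List.mem_cons_of_mem _ hx)
    have hm : Nat.ofDigits 10 ds.reverse < 10 ^ ds.length := by
      have := Nat.ofDigits_lt_base_pow_length (b := 10) (l := ds.reverse) (by omega)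
        (fun x hx => hds x (List.mem_reverse.mp hx))
      simpa using this
    set m := Nat.ofDigits 10 ds.reverse with hmdef
    have hv : (Nat.ofDigits 10 (d :: ds).reverse : Nat) = m + 10 ^ ds.length * d := by
      rw [hmdef, List.reverse_cons, Nat.ofDigits_append]
      simp [Nat.ofDigits_singleton]
    have hsplit : m + 10 ^ ds.length * d + 1 = d * 10 ^ ds.length + (m + 1) := by ring
    have hC : C p (d :: ds).length (Nat.ofDigits 10 (d :: ds).reverse + 1)
        = cntPar p d * 5 ^ ds.length
          + (if (d % 2 == pbit p) then C (!p) ds.length (m + 1) else 0) := by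
      rw [hv, List.length_cons, show C p (ds.length + 1) (m + 10 ^ ds.length * d + 1)
          = (List.range (m + 10 ^ ds.length * d + 1)).countP (patPad p (ds.length + 1)) from rfl,
        hsplit, List.range_add, List.countP_append, List.countP_map]
      congr 1
      · exact C_block ds.length (fun q => C_full ds.length q) p d
      · have hcong : (List.range (m + 1)).countP (patPad p (ds.length + 1) ∘ (fun y => d * 10 ^ ds.length + y))
            = (List.range (m + 1)).countP (fun w => (d % 2 == pbit p) && patPad (!p) ds.length w) := by
          apply List.countP_congr
          intro w hw
          simp only [List.mem_range] at hw
          have hwlt : w < 10 ^ ds.length := by omega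
          have h1 : (d * 10 ^ ds.length + w) / 10 ^ ds.length = d := by
            rw [Nat.mul_comm d (10 ^ ds.length), Nat.mul_add_div (Nat.pow_pos (by omega)),
              Nat.div_eq_of_lt hwlt, Nat.add_zero]
          have h2 : (d * 10 ^ ds.length + w) % 10 ^ ds.length = w := by
            rw [Nat.add_comm, Nat.add_mul_mod_self_right, Nat.mod_eq_of_lt hwlt]
          simp only [Function.comp, patPad_succ, h1, h2]
        rw [hcong]
        cases hx : (d % 2 == pbit p) with
        | false => simp [List.countP_false]
        | true => simp [C]
    rw [hC]
    simp only [walkB]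
    rw [ih (!p) hds]
    push_cast [cntPar, pbit]
    cases p <;> split_ifs <;> ring

theorem boringN_high (k n : Nat) (h1 : 10 ^ k ≤ n) (h2 : n < 10 ^ (k + 1)) :
    boringN n = patPad true (k + 1) n := by
  have hn0 : n ≠ 0 := by
    have : (0 : Nat) < 10 ^ k := Nat.pow_pos (by omega)
    omega
  have hlen : (Nat.digits 10 n).length = k + 1 := by
    rw [Nat.length_digits 10 n (by omega) hn0, Nat.log_eq_of_pow_le_of_lt_pow h1 h2]
  have hlt : ∀ d ∈ (Nat.digits 10 n).reverse, d < 10 := by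
    intro d hd
    exact Nat.digits_lt_base (by omega) (List.mem_reverse.mp hd)
  have := listPat_patPad ((Nat.digits 10 n).reverse) true hlt
  rw [boringN, this]
  simp [hn0, List.length_reverse, hlen, List.reverse_reverse, Nat.ofDigits_digits]

theorem GGn_step (k M : Nat) (h1 : 10 ^ k ≤ M) (h2 : M < 10 ^ (k + 1)) :
    GGn (M + 1) + C true (k + 1) (10 ^ k) = GGn (10 ^ k) + C true (k + 1) (M + 1) := by
  obtain ⟨t, ht⟩ : ∃ t, M + 1 = 10 ^ k + t := ⟨M + 1 - 10 ^ k, by omega⟩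
  have hup : (List.range t).countP (boringN ∘ (fun y => 10 ^ k + y))
      = (List.range t).countP (patPad true (k + 1) ∘ (fun y => 10 ^ k + y)) := by
    apply List.countP_congr
    intro w hw
    simp only [List.mem_range] at hw
    simp only [Function.comp]
    rw [boringN_high k (10 ^ k + w) (by omega) (by omega)]
  have e1 : GGn (M + 1) = GGn (10 ^ k)
      + (List.range t).countP (boringN ∘ (fun y => 10 ^ k + y)) := by
    rw [GGn, ht, List.range_add, List.countP_append, List.countP_map]; rfl
  have e2 : C true (k + 1) (M + 1) = C true (k + 1) (10 ^ k)
      + (List.range t).countP (patPad true (k + 1) ∘ (fun y => 10 ^ k + y)) := by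
    rw [C, ht, List.range_add, List.countP_append, List.countP_map]; rfl
  rw [e1, e2, hup]
  ring

theorem GGn_low (k : Nat) : GGn (10 ^ k) = SSum k := by
  induction k with
  | zero => simp [GGn, SSum, boringN]
  | succ k ih =>
    have hp : (0:Nat) < 10 ^ (k + 1) := Nat.pow_pos (by omega)
    have hlt : (10:Nat) ^ k < 10 ^ (k + 1) := Nat.pow_lt_pow_succ (by omega)
    have hstep := GGn_step k (10 ^ (k + 1) - 1) (by omega) (by omega)
    have hM1 : 10 ^ (k + 1) - 1 + 1 = 10 ^ (k + 1) := by omega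
    rw [hM1, C_full (k + 1) true, ih, C_true_low k] at hstep
    have h5 : (5:Nat) ^ (k + 1) = 5 * 5 ^ k := by ring
    simp [SSum] at *
    omega

theorem foldlS (k : Nat) : ∀ (t : Int),
    (List.range' 1 k).foldl (fun t j => t + (5 : Int) ^ j) t = t + ((SSum k : Nat) : Int) := by
  induction k with
  | zero => intro t; simp [SSum]
  | succ k ih =>
    intro t
    rw [List.range'_1_concat, List.foldl_append, ih]
    simp only [List.foldl_cons, List.foldl_nil, SSum]
    push_cast
    ring

theorem GGn_one : GGn 1 = 0 := by
  simpa [SSum] using GGn_low 0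

theorem g_eq (n : Nat) : g (n : Int) = (GGn (n + 1) : Int) := by
  by_cases hn0 : n = 0
  · subst hn0
    simp [g, GGn_one]
  · have hpos : ¬ ((n : Int) ≤ 0) := by omega
    have hlt10 : ∀ d ∈ (Nat.digits 10 n).reverse, d < 10 := fun d hd =>
      Nat.digits_lt_base (by omega) (List.mem_reverse.mp hd)
    cases hds : (Nat.digits 10 n).reverse with
    | nil =>
      exfalso
      apply hn0
      have hnil : Nat.digits 10 n = [] := by
        have := congrArg List.reverse hds
        simpa using this
      exact Nat.digits_eq_nil_iff_eq_zero.mp hnil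
    | cons d rest =>
      have hlen : (Nat.digits 10 n).length = rest.length + 1 := by
        rw [← List.length_reverse, hds, List.length_cons]
      have hub : n < 10 ^ (rest.length + 1) := by
        have := Nat.lt_base_pow_length_digits (b := 10) (m := n) (by omega)
        rwa [hlen] at this
      have hlb : 10 ^ rest.length ≤ n := by
        have h10 := Nat.base_pow_length_digits_le 10 n (by omega) hn0
        rw [hlen, pow_succ, Nat.mul_comm (10 ^ rest.length) 10] at h10
        exact Nat.le_of_mul_le_mul_left h10 (by omega)
      have hstep := GGn_step rest.length n hlb hub
      have hrev : (d :: rest).reverse = Nat.digits 10 n := by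
        rw [← hds, List.reverse_reverse]
      have hwalk : walkB (d :: rest) true = (C true (rest.length + 1) (n + 1) : Int) := by
        rw [walkB_eq (d :: rest) true (by rw [hds] at hlt10; exact hlt10),
          hrev, Nat.ofDigits_digits, List.length_cons]
      rw [g, if_neg hpos]
      simp only [Int.toNat_natCast, digsLSD_eq, hds, List.length_cons, Nat.add_sub_cancel]
      rw [foldlS, hwalk]
      have hGlow := GGn_low rest.length
      rw [C_true_low rest.length] at hstep
      push_cast at *
      omega

theorem fAux_eq_aux (R : Int) : ∀ (n : Nat) (cur res : Int), (R + 1 - cur).toNat = n →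
    fAux R res cur = res + ((PySem.List.pyRange cur (R + 1) 1).countP isBoring : Int) := by
  intro n
  induction n with
  | zero =>
    intro cur res hn
    rw [fAux, if_neg (by omega), PySem.List.pyRange_one_eq_nil (by omega)]
    simp
  | succ n ih =>
    intro cur res hn
    rw [fAux, if_pos (by omega), ih (cur + 1) _ (by omega),
      PySem.List.pyRange_one_cons (by omega : cur < R + 1), List.countP_cons]
    push_cast
    by_cases hb : isBoring cur
    · simp [hb]
      ring
    · simp [hb]

theorem fAux_eq (R : Int) (cur res : Int) :
    fAux R res cur = res + ((PySem.List.pyRange cur (R + 1) 1).countP isBoring : Int) :=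
  fAux_eq_aux R _ cur res rfl

theorem toDigitsCore_digits : ∀ (fuel n : Nat) (acc : List Char), 1 ≤ n → n < 10 ^ (fuel + 1) →
    Nat.toDigitsCore 10 (fuel + 1) n acc = ((Nat.digits 10 n).reverse.map Nat.digitChar) ++ acc := by
  intro fuel
  induction fuel with
  | zero =>
    intro n acc h1 h2
    have hdiv : n / 10 = 0 := Nat.div_eq_of_lt (by simpa using h2)
    rw [Nat.toDigitsCore, Nat.digits_def' (by omega) (by omega), hdiv, Nat.digits_zero]
    simp
  | succ fuel ih =>
    intro n acc h1 h2
    by_cases hlt : n < 10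
    · have hdiv : n / 10 = 0 := Nat.div_eq_of_lt hlt
      rw [Nat.toDigitsCore, Nat.digits_def' (by omega) (by omega), hdiv, Nat.digits_zero]
      simp
    · have hdiv : ¬ (n / 10 = 0) := by
        intro hc
        have := Nat.div_eq_of_lt (show n < 10 from by
          by_contra hge
          have : 10 ≤ n := by omega
          have := Nat.le_div_iff_mul_le (by omega : 0 < 10) |>.mpr (by omega : 1 * 10 ≤ n)
          omega)
        omega
      have h1' : 1 ≤ n / 10 := Nat.le_div_iff_mul_le (by omega) |>.mpr (by omega)
      have h2' : n / 10 < 10 ^ (fuel + 1) := by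
        rw [Nat.div_lt_iff_lt_mul (by omega)]
        calc n < 10 ^ (fuel + 1 + 1) := h2
        _ = 10 ^ (fuel + 1) * 10 := by ring
      rw [Nat.toDigitsCore]
      simp only [hdiv, if_false]
      rw [ih (n / 10) _ h1' h2', Nat.digits_def' (by omega : 1 < 10) (by omega : 0 < n)]
      simp

theorem toDigits_digits (n : Nat) (h : 1 ≤ n) :
    Nat.toDigits 10 n = (Nat.digits 10 n).reverse.map Nat.digitChar := by
  have hn : n < 10 ^ (n + 1) := by
    calc n < 10 ^ n := Nat.lt_pow_self (by omega)
    _ ≤ 10 ^ (n + 1) := Nat.pow_le_pow_right (by omega) (by omega)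
  rw [Nat.toDigits, toDigitsCore_digits n n [] h hn, List.append_nil]

theorem loop_map : ∀ (ds : List Nat) (i : Nat), (∀ d ∈ ds, d < 10) →
    isBoringLoop (ds.map Nat.digitChar) i = listPat (i % 2 == 0) ds := by
  intro ds
  induction ds with
  | nil => exact fun i h => rfl
  | cons d rest ih =>
    intro i h
    have hd : d < 10 := h d (List.mem_cons_self ..)
    have hrest : ∀ x ∈ rest, x < 10 := fun x hx => h x (List.mem_cons_of_mem _ hx)
    have hmem_e : (Nat.digitChar d ∈ ['0','2','4','6','8']) ↔ d % 2 = 0 := by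
      interval_cases d <;> decide
    have hmem_o : (Nat.digitChar d ∈ ['1','3','5','7','9']) ↔ d % 2 = 1 := by
      interval_cases d <;> decide
    show isBoringLoop (Nat.digitChar d :: rest.map Nat.digitChar) i = _
    rw [isBoringLoop]
    by_cases hp : i % 2 = 0
    · rw [if_pos hp]
      by_cases he : Nat.digitChar d ∈ ['0','2','4','6','8']
      · rw [if_pos he]
        have : d % 2 = 0 := hmem_e.mp he
        simp [listPat, hp, pbit, this]
      · rw [if_neg he, ih (i + 1) hrest]
        have hd2 : d % 2 = 1 := by
          have := hmem_e.not.mp he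
          omega
        have h1 : (i + 1) % 2 = 1 := by omega
        simp [listPat, hp, h1, pbit, hd2]
    · rw [if_neg hp]
      by_cases ho : Nat.digitChar d ∈ ['1','3','5','7','9']
      · rw [if_pos ho]
        have : d % 2 = 1 := hmem_o.mp ho
        have hp1 : i % 2 = 1 := by omega
        simp [listPat, hp1, pbit, this]
      · rw [if_neg ho, ih (i + 1) hrest]
        have hd2 : d % 2 = 0 := by
          have := hmem_o.not.mp ho
          omega
        have hp1 : i % 2 = 1 := by omega
        have h1 : (i + 1) % 2 = 0 := by omega
        simp [listPat, hp1, h1, pbit, hd2]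

theorem isBoring_nonneg (n : Nat) : isBoring (n : Int) = boringN n := by
  by_cases hn : n = 0
  · subst hn; decide
  · have hchars : PySem.Int.toChars (n : Int) = Nat.toDigits 10 n := by
      rw [PySem.Int.toChars, if_neg (by omega)]
      simp
    rw [isBoring, hchars, toDigits_digits n (by omega),
      loop_map _ 0 (fun d hd => Nat.digits_lt_base (by omega) (List.mem_reverse.mp hd))]
    simp [boringN, hn]

theorem GGn_split (a c : Nat) (h : a ≤ c) :
    GGn c = GGn a + (List.range (c - a)).countP (fun k => boringN (a + k)) := by
  have h2 : c = a + (c - a) := by omega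
  rw [GGn, GGn]
  conv_lhs => rw [h2]
  rw [List.range_add, List.countP_append, List.countP_map]
  rfl

theorem count_pos (a c : Nat) (h : a ≤ c) :
    ((PySem.List.pyRange (a : Int) (c : Int) 1).countP isBoring) + GGn a = GGn c := by
  rw [PySem.List.pyRange_one, List.countP_map]
  have hcnt : ((c : Int) - (a : Int)).toNat = c - a := by omega
  rw [hcnt]
  have hcong : (List.range (c - a)).countP (isBoring ∘ (fun k : Nat => (a : Int) + k))
      = (List.range (c - a)).countP (fun k => boringN (a + k)) := by
    apply List.countP_congr
    intro k _
    have : ((a : Int) + (k : Int)) = ((a + k : Nat) : Int) := by push_cast; ring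
    simp only [Function.comp, this, isBoring_nonneg]
  rw [hcong, GGn_split a c h]
  omega

theorem g_eq' (N : Int) (h : 0 ≤ N) : g N = (GGn (N.toNat + 1) : Int) := by
  have := g_eq N.toNat
  rwa [Int.toNat_of_nonneg h] at this

-- ===== VERDICT (by name: the statement is the Claim_ definition above) =====
theorem f_spec : Claim_equal_f := by
  intro L R _ hpre
  have hL0 : 0 ≤ L := hpre
  show f L R = f_alt L R
  rw [f, fAux_eq R L 0, zero_add]
  by_cases hLR : R < L
  · rw [PySem.List.pyRange_one_eq_nil (by omega), f_alt, if_pos (by omega)]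
    rfl
  · rw [f_alt, if_neg (by omega)]
    have hc := count_pos L.toNat (R.toNat + 1) (by omega)
    have hargs1 : ((L.toNat : Nat) : Int) = L := by omega
    have hargs2 : (((R.toNat + 1 : Nat)) : Int) = R + 1 := by omega
    rw [hargs1, hargs2] at hc
    rw [g_eq' R (by omega)]
    by_cases hL1 : 1 ≤ L
    · rw [g_eq' (L - 1) (by omega)]
      have heq : (L - 1).toNat + 1 = L.toNat := by omega
      rw [heq]
      omega
    · have hL00 : L = 0 := by omega
      subst hL00
      rw [show g ((0 : Int) - 1) = 0 from by decide]
      simp only [Int.toNat_zero] at hc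
      rw [GGn, List.range_zero, List.countP_nil] at hc
      omega
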